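-- pv_equiv track=rewrite | github.com/lenaezhova/generators | lab3/algorithms/helpers/helpers.py | funcOr
-- ===== SOURCE A (Python) =====
-- def funcOr(list1, list2):
--     min_length = min(len(list1), len(list2))
--     result = [1 if list1[i] == 1 or list2[i] == 1 else 0 for i in range(min_length)]
--
--     if len(list1) > len(list2):
--         result.extend(list1[min_length:])
--     else:
--         result.extend(list2[min_length:])
--
--     return result
-- ===== SOURCE B (Python) =====
-- def funcOr(list1, list2):
--     # Single unified pass over both sequences at once (zip_longest-style with a
--     # fresh sentinel), instead of A's prefix comprehension + tail extend.
--     result = []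
--     it1, it2 = iter(list1), iter(list2)
--     _s = object()
--     while True:
--         a = next(it1, _s)
--         b = next(it2, _s)
--         if a is _s and b is _s:
--             return result
--         if a is _s:
--             result.append(b)
--         elif b is _s:
--             result.append(a)
--         else:
--             result.append(1 if a == 1 or b == 1 else 0)
-- ===== Notes on version B (the rewrite author's own statement) =====
-- stated objective: simpler
-- what changed: Replaced A's two-phase construction (index comprehension over range(min_length), then a length comparison and a slice extend for the tail) with a single unified zip_longest-style pass using a fresh sentinel, appending each pair's OR or the surviving element as it goes.
import Mathlib
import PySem

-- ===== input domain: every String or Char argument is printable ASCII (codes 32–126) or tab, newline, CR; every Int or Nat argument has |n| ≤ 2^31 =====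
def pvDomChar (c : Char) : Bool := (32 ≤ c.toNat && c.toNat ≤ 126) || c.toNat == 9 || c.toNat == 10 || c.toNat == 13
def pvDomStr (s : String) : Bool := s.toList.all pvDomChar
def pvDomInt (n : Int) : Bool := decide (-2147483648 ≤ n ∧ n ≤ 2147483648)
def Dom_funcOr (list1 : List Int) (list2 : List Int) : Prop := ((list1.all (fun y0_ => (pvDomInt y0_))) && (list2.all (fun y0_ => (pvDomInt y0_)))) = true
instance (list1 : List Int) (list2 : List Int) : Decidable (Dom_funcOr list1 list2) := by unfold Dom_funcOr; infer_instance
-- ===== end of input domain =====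

-- B replaces A's prefix-comprehension-plus-tail-extend with one unified zip_longest-style
-- pass over both lists (objective: simpler; same return value).

-- ===== PORT A =====
def funcOr (list1 : List Int) (list2 : List Int) : List Int :=
  let minLength : Int := min (list1.length : Int) (list2.length : Int)
  let result : List Int := (PySem.List.pyRange 0 minLength 1).map (fun i =>
    if PySem.List.pyGetD list1 i 0 = 1 ∨ PySem.List.pyGetD list2 i 0 = 1 then (1 : Int) else 0)
  if (list1.length : Int) > (list2.length : Int) then
    result ++ PySem.List.slice list1 (some minLength) none
  else
    result ++ PySem.List.slice list2 (some minLength) none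

-- ===== PORT B =====
-- single unified pass: each step consumes one element from each still-nonempty list;
-- a list already exhausted corresponds to the sentinel branch of Source B
def funcOr_alt : List Int → List Int → List Int
  | [], [] => []
  | [], b :: t2 => b :: funcOr_alt [] t2
  | a :: t1, [] => a :: funcOr_alt t1 []
  | a :: t1, b :: t2 => (if a = 1 ∨ b = 1 then (1 : Int) else 0) :: funcOr_alt t1 t2

-- ===== PRECONDITION & SPEC =====
def Spec_funcOr (list1 : List Int) (list2 : List Int) (out : List Int) : Prop := out = funcOr_alt list1 list2
instance (list1 : List Int) (list2 : List Int) (out : List Int) : Decidable (Spec_funcOr list1 list2 out) := by unfold Spec_funcOr; infer_instance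

-- ===== CLAIM (what is proved, stated in full; the proofs are below) =====
def Claim_equal_funcOr : Prop := ∀ (list1 : List Int) (list2 : List Int), Dom_funcOr list1 list2 → Spec_funcOr list1 list2 (funcOr list1 list2)

-- ===== LEMMAS AND PROOFS =====
theorem funcOr_alt_nil_left (l2 : List Int) : funcOr_alt [] l2 = l2 := by
  induction l2 with
  | nil => simp [funcOr_alt]
  | cons b t2 ih => simp [funcOr_alt, ih]

theorem funcOr_alt_nil_right (l1 : List Int) : funcOr_alt l1 [] = l1 := by
  induction l1 with
  | nil => simp [funcOr_alt]
  | cons a t1 ih => simp [funcOr_alt, ih]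

-- shifting the index range by one steps both lists under their heads
theorem funcOr_index_shift (a b : Int) (t1 t2 : List Int) (k : Int) :
    (PySem.List.pyRange 1 (k+1) 1).map (fun i =>
      if PySem.List.pyGetD (a :: t1) i 0 = 1 ∨ PySem.List.pyGetD (b :: t2) i 0 = 1 then (1:Int) else 0)
    = (PySem.List.pyRange 0 k 1).map (fun i =>
      if PySem.List.pyGetD t1 i 0 = 1 ∨ PySem.List.pyGetD t2 i 0 = 1 then (1:Int) else 0) := by
  rw [PySem.List.pyRange_one, PySem.List.pyRange_one]
  simp only [add_sub_cancel_right, sub_zero, List.map_map]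
  apply List.map_congr_left
  intro n _
  have h1 : (1:Int) + (n:Int) = ((n+1 : Nat) : Int) := by push_cast; ring
  simp only [Function.comp, zero_add, h1, PySem.List.pyGetD_natCast, List.getD_cons_succ]

theorem funcOr_cons_cons (a b : Int) (t1 t2 : List Int) :
    funcOr (a :: t1) (b :: t2) = (if a = 1 ∨ b = 1 then (1 : Int) else 0) :: funcOr t1 t2 := by
  simp only [funcOr, List.length_cons]
  have hk : (0:Int) ≤ min (t1.length : Int) (t2.length : Int) := le_min (by positivity) (by positivity)
  have hmin : min ((t1.length:Int)+1) ((t2.length:Int)+1)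
      = min (t1.length:Int) (t2.length:Int) + 1 := by omega
  push_cast
  rw [hmin, PySem.List.pyRange_one_cons (by omega)]
  have htoNat : (min (t1.length:Int) (t2.length:Int) + 1).toNat
      = (min (t1.length:Int) (t2.length:Int)).toNat + 1 := by omega
  have hsl1 : PySem.List.slice (a :: t1) (some (min (t1.length:Int) (t2.length:Int) + 1)) none
      = PySem.List.slice t1 (some (min (t1.length:Int) (t2.length:Int))) none := by
    rw [PySem.List.slice_from _ (by omega), PySem.List.slice_from _ hk, htoNat, List.drop_succ_cons]
  have hsl2 : PySem.List.slice (b :: t2) (some (min (t1.length:Int) (t2.length:Int) + 1)) none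
      = PySem.List.slice t2 (some (min (t1.length:Int) (t2.length:Int))) none := by
    rw [PySem.List.slice_from _ (by omega), PySem.List.slice_from _ hk, htoNat, List.drop_succ_cons]
  have hcond : ((t1.length:Int) + 1 > (t2.length:Int) + 1) = ((t1.length:Int) > (t2.length:Int)) := by
    simp
  simp only [List.map_cons, PySem.List.pyGetD_zero_cons, hsl1, hsl2, hcond, zero_add]
  rw [funcOr_index_shift]
  split_ifs with h <;> rfl

theorem funcOr_eq_alt (list1 list2 : List Int) : funcOr list1 list2 = funcOr_alt list1 list2 := by
  induction list1 generalizing list2 with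
  | nil =>
    simp [funcOr, funcOr_alt_nil_left, PySem.List.slice_from]
  | cons a t1 ih =>
    cases list2 with
    | nil =>
      have h0 : min ((t1.length:Int)+1) 0 = 0 := by omega
      simp [funcOr, funcOr_alt_nil_right, h0, PySem.List.slice_from]
    | cons b t2 =>
      rw [funcOr_cons_cons, ih]
      simp [funcOr_alt]

-- ===== VERDICT (by name: the statement is the Claim_ definition above) =====
theorem funcOr_spec : Claim_equal_funcOr := by
  intro list1 list2 _
  exact funcOr_eq_alt list1 list2
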